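-- pv_equiv track=rewrite | github.com/Youssef-1911/ThreatGPT | backend/app/document_ingestion.py | _normalize_phase_bucket
-- ===== SOURCE A (Python) =====
-- def _normalize_phase_bucket(phase: str | None) -> str | None:
--     if not phase:
--         return None
--
--     normalized_phase = phase.strip().lower().replace(" ", "_").replace("-", "_").replace("/", "_")
--     normalized_phase = "_".join(part for part in normalized_phase.split("_") if part)
--
--     if normalized_phase in {"planning", "plan", "pre_development"}:
--         return "planning"
--     if normalized_phase in {"in_development", "development", "dev"}:
--         return "in_development"
--     if normalized_phase in {"pre_release", "testing", "pre_release_testing"}: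
--         return "pre_release"
--     return "general"
-- ===== SOURCE B (Python) =====
-- _BUCKETS = {
--     "planning": "planning", "plan": "planning", "pre_development": "planning",
--     "in_development": "in_development", "development": "in_development", "dev": "in_development",
--     "pre_release": "pre_release", "testing": "pre_release", "pre_release_testing": "pre_release",
-- }
--
--
-- def _normalize_phase_bucket(phase):
--     if not phase:
--         return None
--     # single character pass: ' ', '-', '/' and '_' are all token separators,
--     # empty tokens disappear automatically
--     parts = []
--     cur = []
--     for ch in phase.strip().lower():
--         if ch in " -/_":
--             if cur:
--                 parts.append("".join(cur))
--                 cur = []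
--         else:
--             cur.append(ch)
--     if cur:
--         parts.append("".join(cur))
--     return _BUCKETS.get("_".join(parts), "general")
-- ===== Notes on version B (the rewrite author's own statement) =====
-- stated objective: simpler
-- what changed: Replaced the three chained replace() calls plus split/filter/join and the three sequential set-membership if-statements by a single character pass that tokenizes on ' ', '-', '/', '_' (dropping empty tokens as it goes) and one flat alias-to-bucket dictionary lookup with default 'general'.
import Mathlib
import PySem

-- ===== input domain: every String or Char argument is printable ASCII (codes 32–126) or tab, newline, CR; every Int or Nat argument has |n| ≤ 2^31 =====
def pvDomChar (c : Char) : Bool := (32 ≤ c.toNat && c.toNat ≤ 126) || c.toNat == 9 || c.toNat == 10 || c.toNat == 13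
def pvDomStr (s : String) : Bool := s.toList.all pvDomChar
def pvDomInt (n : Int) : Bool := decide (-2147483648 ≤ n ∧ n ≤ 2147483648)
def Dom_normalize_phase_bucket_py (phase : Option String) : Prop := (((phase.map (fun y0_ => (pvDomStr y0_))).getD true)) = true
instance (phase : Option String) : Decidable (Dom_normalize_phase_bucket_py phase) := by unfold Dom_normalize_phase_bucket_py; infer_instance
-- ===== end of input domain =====

-- B replaces A's three chained replace() calls + split/join + three set-membership ifs by a
-- single character pass that tokenizes on ' ', '-', '/', '_' and one alias→bucket dictionary
-- lookup with default "general" (objective: simpler; same behaviour).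

-- ===== PORT A =====
def normalize_phase_bucket_py (phase : Option String) : Option String :=
  match phase with
  | none => none
  | some p =>
    if p = "" then none
    else
      let n1 := PySem.Chars.replace (PySem.Chars.replace (PySem.Chars.replace
                  (PySem.Chars.lower (PySem.Chars.strip p.toList)) [' '] ['_']) ['-'] ['_']) ['/'] ['_']
      let n := PySem.Chars.join ['_'] ((PySem.Chars.splitOn n1 ['_']).filter (fun part => part ≠ []))
      if n ∈ PySem.Set.ofList ["planning".toList, "plan".toList, "pre_development".toList] then
        some "planning"
      else if n ∈ PySem.Set.ofList ["in_development".toList, "development".toList, "dev".toList] then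
        some "in_development"
      else if n ∈ PySem.Set.ofList ["pre_release".toList, "testing".toList, "pre_release_testing".toList] then
        some "pre_release"
      else some "general"

-- ===== PORT B =====
-- the module-level _BUCKETS dict of Source B
def pvBuckets : PySem.Dict (List Char) (List Char) := PySem.Dict.mk
  [("planning".toList, "planning".toList), ("plan".toList, "planning".toList),
   ("pre_development".toList, "planning".toList),
   ("in_development".toList, "in_development".toList), ("development".toList, "in_development".toList),
   ("dev".toList, "in_development".toList),
   ("pre_release".toList, "pre_release".toList), ("testing".toList, "pre_release".toList),
   ("pre_release_testing".toList, "pre_release".toList)]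

def normalize_phase_bucket_py_alt (phase : Option String) : Option String :=
  match phase with
  | none => none
  | some p =>
    if p = "" then none
    else
      let st := (PySem.Chars.lower (PySem.Chars.strip p.toList)).foldl
          (fun (st : List (List Char) × List Char) ch =>
            if ch ∈ [' ', '-', '/', '_'] then
              (if st.2 ≠ [] then (st.1 ++ [st.2], ([] : List Char)) else st)
            else (st.1, st.2 ++ [ch])) ([], [])
      let parts := if st.2 ≠ [] then st.1 ++ [st.2] else st.1
      some (String.mk (PySem.Dict.getD pvBuckets (PySem.Chars.join ['_'] parts) "general".toList))

-- ===== PRECONDITION & SPEC =====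
def Spec_normalize_phase_bucket_py (phase : Option String) (out : Option String) : Prop := out = normalize_phase_bucket_py_alt phase
instance (phase : Option String) (out : Option String) : Decidable (Spec_normalize_phase_bucket_py phase out) := by unfold Spec_normalize_phase_bucket_py; infer_instance

-- ===== CLAIM (what is proved, stated in full; the proofs are below) =====
def Claim_equal_normalize_phase_bucket_py : Prop := ∀ (phase : Option String), Dom_normalize_phase_bucket_py phase → Spec_normalize_phase_bucket_py phase (normalize_phase_bucket_py phase)

-- ===== LEMMAS AND PROOFS =====

-- proof-side vocabulary -------------------------------------------------------

def pvRep (c : Char) : Char := if c = ' ' ∨ c = '-' ∨ c = '/' then '_' else c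

def pvIsSep (c : Char) : Bool := c == ' ' || c == '-' || c == '/' || c == '_'

def pvConsCur (pre : List Char) : List (List Char) → List (List Char)
  | [] => [pre]
  | t :: ts => (pre ++ t) :: ts

def pvSplit (p : Char → Bool) : List Char → List (List Char)
  | [] => [[]]
  | c :: cs => if p c then [] :: pvSplit p cs else pvConsCur [c] (pvSplit p cs)

def pvTokens : List Char → List Char → List (List Char)
  | cur, [] => if cur = [] then [] else [cur]
  | cur, c :: cs =>
    if pvIsSep c then (if cur = [] then pvTokens [] cs else cur :: pvTokens [] cs)
    else pvTokens (cur ++ [c]) cs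

-- single-character replace is a map ------------------------------------------

lemma pv_replace_go (a b : Char) :
    ∀ (fuel : Nat) (l acc : List Char), l.length ≤ fuel →
      PySem.Chars.replace.go [a] [b] fuel l acc
        = acc.reverse ++ l.map (fun c => if c = a then b else c) := by
  intro fuel
  induction fuel with
  | zero =>
    intro l acc h
    have : l = [] := by cases l <;> simp_all
    subst this; simp [PySem.Chars.replace.go]
  | succ n ih =>
    intro l acc h
    cases l with
    | nil => simp [PySem.Chars.replace.go]
    | cons c t =>
      by_cases hc : c = a
      · subst hc
        have hp : List.isPrefixOf [c] (c :: t) = true := by simp [List.isPrefixOf]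
        simp only [PySem.Chars.replace.go]
        rw [if_pos hp]
        have hd : List.drop [c].length (c :: t) = t := rfl
        rw [hd]
        simp only [List.length_cons] at h
        rw [ih t _ (by omega)]
        simp
      · have hp : List.isPrefixOf [a] (c :: t) = false := by
          simp [List.isPrefixOf, hc]; exact fun h' => absurd h'.symm hc
        simp only [PySem.Chars.replace.go]
        rw [if_neg (by simp [hp])]
        simp only [List.length_cons] at h
        rw [ih t _ (by omega)]
        simp [hc]

lemma pv_replace_single (a b : Char) (l : List Char) :
    PySem.Chars.replace l [a] [b] = l.map (fun c => if c = a then b else c) := by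
  unfold PySem.Chars.replace
  rw [if_neg (by simp)]
  simpa using pv_replace_go a b l.length l [] (le_refl _)

-- Python split on "_" is pvSplit ---------------------------------------------

lemma pvSplit_ne_nil (p : Char → Bool) (cs : List Char) : pvSplit p cs ≠ [] := by
  cases cs with
  | nil => simp [pvSplit]
  | cons c cs =>
    by_cases h : p c
    · simp [pvSplit, h]
    · simp only [pvSplit, h, if_neg, Bool.false_eq_true, not_false_iff, if_false]
      cases pvSplit p cs <;> simp [pvConsCur]

lemma pv_splitOn_go :
    ∀ (fuel : Nat) (l cur : List Char) (acc : List (List Char)), l.length < fuel →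
      PySem.Chars.splitOn.go ['_'] fuel l cur acc
        = acc.reverse ++ pvConsCur cur.reverse (pvSplit (· == '_') l) := by
  intro fuel
  induction fuel with
  | zero => intro l cur acc h; exact absurd h (Nat.not_lt_zero _)
  | succ n ih =>
    intro l cur acc h
    cases l with
    | nil => simp [PySem.Chars.splitOn.go, pvSplit, pvConsCur]
    | cons c t =>
      by_cases hc : c = '_'
      · subst hc
        have hp : List.isPrefixOf ['_'] ('_' :: t) = true := by simp [List.isPrefixOf]
        simp only [PySem.Chars.splitOn.go]
        rw [if_pos hp]
        have hd : List.drop ['_'].length ('_' :: t) = t := rfl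
        rw [hd]
        simp only [List.length_cons] at h
        rw [ih t [] _ (by omega)]
        simp only [pvSplit, List.reverse_nil, beq_self_eq_true, if_pos]
        cases hs : pvSplit (fun x => x == '_') t with
        | nil => exact absurd hs (pvSplit_ne_nil _ _)
        | cons a as => simp [pvConsCur]
      · have hp : List.isPrefixOf ['_'] (c :: t) = false := by
          simp [List.isPrefixOf]; exact fun h' => absurd h'.symm hc
        simp only [PySem.Chars.splitOn.go]
        rw [if_neg (by simp [hp])]
        simp only [List.length_cons] at h
        rw [ih t (c :: cur) acc (by omega)]
        have : pvSplit (· == '_') (c :: t) = pvConsCur [c] (pvSplit (· == '_') t) := by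
          simp [pvSplit, hc]
        rw [this]
        cases pvSplit (· == '_') t <;> simp [pvConsCur]

lemma pv_splitOn_eq (l : List Char) :
    PySem.Chars.splitOn l ['_'] = pvSplit (· == '_') l := by
  unfold PySem.Chars.splitOn
  rw [pv_splitOn_go (l.length + 1) l [] [] (by omega)]
  cases h : pvSplit (· == '_') l with
  | nil => exact absurd h (pvSplit_ne_nil _ _)
  | cons t ts => simp [pvConsCur]

-- composing the three replaces, then splitting --------------------------------

lemma pv_rep3_eq (cs : List Char) :
    ((cs.map (fun c => if c = ' ' then '_' else c)).map (fun c => if c = '-' then '_' else c)).map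
        (fun c => if c = '/' then '_' else c) = cs.map pvRep := by
  simp only [List.map_map]
  apply List.map_congr_left
  intro c _
  by_cases h1 : c = ' ' <;> by_cases h2 : c = '-' <;> by_cases h3 : c = '/' <;>
    simp_all [pvRep, Function.comp]

lemma pv_split_map (cs : List Char) :
    pvSplit (· == '_') (cs.map pvRep) = pvSplit pvIsSep cs := by
  induction cs with
  | nil => simp [pvSplit]
  | cons c cs ih =>
    have hpt : (pvRep c == '_') = pvIsSep c := by
      by_cases h1 : c = ' ' <;> by_cases h2 : c = '-' <;> by_cases h3 : c = '/' <;>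
        by_cases h4 : c = '_' <;> simp_all [pvRep, pvIsSep]
    by_cases h : pvIsSep c = true
    · simp only [List.map_cons, pvSplit, hpt, h, if_pos, ih]
    · have h' : ¬(c = ' ' ∨ c = '-' ∨ c = '/' ∨ c = '_') := by
        intro hc; apply h; simp [pvIsSep]; tauto
      have hr : pvRep c = c := by
        unfold pvRep
        rw [if_neg (show ¬(c = ' ' ∨ c = '-' ∨ c = '/') from fun hx => h' (by tauto))]
      have hu : (c == '_') = false := by
        simp only [beq_eq_false_iff_ne, ne_eq]
        intro hx; exact h' (by tauto)
      simp only [List.map_cons, pvSplit, hr, hu, Bool.false_eq_true, if_false, ih]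
      rw [if_neg h]

-- B's tokenizer ---------------------------------------------------------------

lemma pv_tokens_filter :
    ∀ (cs : List Char) (cur : List Char),
      pvTokens cur cs = (pvConsCur cur (pvSplit pvIsSep cs)).filter (fun t => t ≠ []) := by
  intro cs
  induction cs with
  | nil =>
    intro cur
    by_cases h : cur = [] <;> simp [pvTokens, pvSplit, pvConsCur, h]
  | cons c cs ih =>
    intro cur
    by_cases h : pvIsSep c = true
    · have hnil : pvTokens [] cs = (pvSplit pvIsSep cs).filter (fun t => t ≠ []) := by
        rw [ih []]
        cases hs : pvSplit pvIsSep cs with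
        | nil => exact absurd hs (pvSplit_ne_nil _ _)
        | cons t ts => simp [pvConsCur]
      by_cases hc : cur = []
      · simp [pvTokens, pvSplit, h, hc, pvConsCur, hnil]
      · simp [pvTokens, pvSplit, h, hc, pvConsCur, hnil]
    · have hs : pvSplit pvIsSep (c :: cs) = pvConsCur [c] (pvSplit pvIsSep cs) := by
        simp [pvSplit, h]
      simp only [pvTokens]
      rw [if_neg h, ih (cur ++ [c]), hs]
      cases pvSplit pvIsSep cs <;> simp [pvConsCur]

lemma pv_foldl_tokens :
    ∀ (cs : List Char) (parts : List (List Char)) (cur : List Char),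
      (let st := cs.foldl
          (fun (st : List (List Char) × List Char) ch =>
            if ch ∈ [' ', '-', '/', '_'] then
              (if st.2 ≠ [] then (st.1 ++ [st.2], ([] : List Char)) else st)
            else (st.1, st.2 ++ [ch])) (parts, cur);
       if st.2 ≠ [] then st.1 ++ [st.2] else st.1)
        = parts ++ pvTokens cur cs := by
  intro cs
  induction cs with
  | nil =>
    intro parts cur
    by_cases h : cur = [] <;> simp [pvTokens, h]
  | cons c cs ih =>
    intro parts cur
    by_cases h : c ∈ [' ', '-', '/', '_']
    · have hsep : pvIsSep c = true := by
        simp only [List.mem_cons, List.not_mem_nil, or_false] at h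
        simp only [pvIsSep, Bool.or_eq_true, beq_iff_eq]
        tauto
      by_cases hc : cur = []
      · subst hc
        have h1 : List.foldl
              (fun (st : List (List Char) × List Char) ch =>
                if ch ∈ [' ', '-', '/', '_'] then
                  (if st.2 ≠ [] then (st.1 ++ [st.2], ([] : List Char)) else st)
                else (st.1, st.2 ++ [ch])) (parts, ([] : List Char)) (c :: cs)
            = List.foldl
              (fun (st : List (List Char) × List Char) ch =>
                if ch ∈ [' ', '-', '/', '_'] then
                  (if st.2 ≠ [] then (st.1 ++ [st.2], ([] : List Char)) else st)
                else (st.1, st.2 ++ [ch])) (parts, ([] : List Char)) cs := by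
          rw [List.foldl_cons]; congr 1; simp [h]
        have h2 : pvTokens [] (c :: cs) = pvTokens [] cs := by
          simp [pvTokens, hsep]
        simp only [h1, h2]
        exact ih parts []
      · have h1 : List.foldl
              (fun (st : List (List Char) × List Char) ch =>
                if ch ∈ [' ', '-', '/', '_'] then
                  (if st.2 ≠ [] then (st.1 ++ [st.2], ([] : List Char)) else st)
                else (st.1, st.2 ++ [ch])) (parts, cur) (c :: cs)
            = List.foldl
              (fun (st : List (List Char) × List Char) ch =>
                if ch ∈ [' ', '-', '/', '_'] then
                  (if st.2 ≠ [] then (st.1 ++ [st.2], ([] : List Char)) else st)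
                else (st.1, st.2 ++ [ch])) (parts ++ [cur], ([] : List Char)) cs := by
          rw [List.foldl_cons]; congr 1; simp [h, hc]
        have h2 : pvTokens cur (c :: cs) = cur :: pvTokens [] cs := by
          simp [pvTokens, hsep, hc]
        simp only [h1, h2]
        rw [ih (parts ++ [cur]) []]
        simp
    · have hsep : pvIsSep c = false := by
        simp only [List.mem_cons, List.not_mem_nil, or_false] at h
        simp only [pvIsSep, Bool.or_eq_true, beq_iff_eq, Bool.not_eq_true]
        simp only [Bool.or_eq_false_iff, beq_eq_false_iff_ne, ne_eq]
        tauto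
      have h1 : List.foldl
            (fun (st : List (List Char) × List Char) ch =>
              if ch ∈ [' ', '-', '/', '_'] then
                (if st.2 ≠ [] then (st.1 ++ [st.2], ([] : List Char)) else st)
              else (st.1, st.2 ++ [ch])) (parts, cur) (c :: cs)
          = List.foldl
            (fun (st : List (List Char) × List Char) ch =>
              if ch ∈ [' ', '-', '/', '_'] then
                (if st.2 ≠ [] then (st.1 ++ [st.2], ([] : List Char)) else st)
              else (st.1, st.2 ++ [ch])) (parts, cur ++ [c]) cs := by
        rw [List.foldl_cons]; congr 1; simp [h]
      have h2 : pvTokens cur (c :: cs) = pvTokens (cur ++ [c]) cs := by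
        simp only [pvTokens, hsep, Bool.false_eq_true, if_false]
      simp only [h1, h2]
      exact ih parts (cur ++ [c])

-- membership chain = dictionary lookup ----------------------------------------

lemma pv_bucket_eq (k : List Char) :
    (if k ∈ PySem.Set.ofList ["planning".toList, "plan".toList, "pre_development".toList] then
        (some "planning" : Option String)
      else if k ∈ PySem.Set.ofList ["in_development".toList, "development".toList, "dev".toList] then
        some "in_development"
      else if k ∈ PySem.Set.ofList ["pre_release".toList, "testing".toList, "pre_release_testing".toList] then
        some "pre_release"
      else some "general")
      = some (String.mk (PySem.Dict.getD pvBuckets k "general".toList)) := by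
  by_cases h1 : k = "planning".toList; · subst h1; decide
  by_cases h2 : k = "plan".toList; · subst h2; decide
  by_cases h3 : k = "pre_development".toList; · subst h3; decide
  by_cases h4 : k = "in_development".toList; · subst h4; decide
  by_cases h5 : k = "development".toList; · subst h5; decide
  by_cases h6 : k = "dev".toList; · subst h6; decide
  by_cases h7 : k = "pre_release".toList; · subst h7; decide
  by_cases h8 : k = "testing".toList; · subst h8; decide
  by_cases h9 : k = "pre_release_testing".toList; · subst h9; decide
  have e1 : PySem.Set.ofList ["planning".toList, "plan".toList, "pre_development".toList]
      = ["planning".toList, "plan".toList, "pre_development".toList] := by rfl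
  have e2 : PySem.Set.ofList ["in_development".toList, "development".toList, "dev".toList]
      = ["in_development".toList, "development".toList, "dev".toList] := by rfl
  have e3 : PySem.Set.ofList ["pre_release".toList, "testing".toList, "pre_release_testing".toList]
      = ["pre_release".toList, "testing".toList, "pre_release_testing".toList] := by rfl
  have m1 : ¬ (k ∈ PySem.Set.ofList ["planning".toList, "plan".toList, "pre_development".toList]) := by
    rw [e1]; simp only [List.mem_cons, List.not_mem_nil, or_false]
    rintro (hx | hx | hx)
    · exact h1 hx
    · exact h2 hx
    · exact h3 hx
  have m2 : ¬ (k ∈ PySem.Set.ofList ["in_development".toList, "development".toList, "dev".toList]) := by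
    rw [e2]; simp only [List.mem_cons, List.not_mem_nil, or_false]
    rintro (hx | hx | hx)
    · exact h4 hx
    · exact h5 hx
    · exact h6 hx
  have m3 : ¬ (k ∈ PySem.Set.ofList ["pre_release".toList, "testing".toList, "pre_release_testing".toList]) := by
    rw [e3]; simp only [List.mem_cons, List.not_mem_nil, or_false]
    rintro (hx | hx | hx)
    · exact h7 hx
    · exact h8 hx
    · exact h9 hx
  rw [if_neg m1, if_neg m2, if_neg m3]
  have hk1 : ((['p', 'l', 'a', 'n', 'n', 'i', 'n', 'g'] : List Char) == k) = false := beq_eq_false_iff_ne.mpr (Ne.symm h1)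
  have hk2 : ((['p', 'l', 'a', 'n'] : List Char) == k) = false := beq_eq_false_iff_ne.mpr (Ne.symm h2)
  have hk3 : ((['p', 'r', 'e', '_', 'd', 'e', 'v', 'e', 'l', 'o', 'p', 'm', 'e', 'n', 't'] : List Char) == k) = false := beq_eq_false_iff_ne.mpr (Ne.symm h3)
  have hk4 : ((['i', 'n', '_', 'd', 'e', 'v', 'e', 'l', 'o', 'p', 'm', 'e', 'n', 't'] : List Char) == k) = false := beq_eq_false_iff_ne.mpr (Ne.symm h4)
  have hk5 : ((['d', 'e', 'v', 'e', 'l', 'o', 'p', 'm', 'e', 'n', 't'] : List Char) == k) = false := beq_eq_false_iff_ne.mpr (Ne.symm h5)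
  have hk6 : ((['d', 'e', 'v'] : List Char) == k) = false := beq_eq_false_iff_ne.mpr (Ne.symm h6)
  have hk7 : ((['p', 'r', 'e', '_', 'r', 'e', 'l', 'e', 'a', 's', 'e'] : List Char) == k) = false := beq_eq_false_iff_ne.mpr (Ne.symm h7)
  have hk8 : ((['t', 'e', 's', 't', 'i', 'n', 'g'] : List Char) == k) = false := beq_eq_false_iff_ne.mpr (Ne.symm h8)
  have hk9 : ((['p', 'r', 'e', '_', 'r', 'e', 'l', 'e', 'a', 's', 'e', '_', 't', 'e', 's', 't', 'i', 'n', 'g'] : List Char) == k) = false := beq_eq_false_iff_ne.mpr (Ne.symm h9)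
  have hf : List.find? (fun q => q.1 == k) (pvBuckets.items) = none := by
    show List.find? (fun q => q.1 == k)
        [("planning".toList, "planning".toList), ("plan".toList, "planning".toList),
         ("pre_development".toList, "planning".toList),
         ("in_development".toList, "in_development".toList),
         ("development".toList, "in_development".toList),
         ("dev".toList, "in_development".toList),
         ("pre_release".toList, "pre_release".toList), ("testing".toList, "pre_release".toList),
         ("pre_release_testing".toList, "pre_release".toList)] = none
    simp [List.find?, hk1, hk2, hk3, hk4, hk5, hk6, hk7, hk8, hk9]
  simp only [PySem.Dict.getD, PySem.Dict.get?]
  rw [hf]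
  decide

-- ===== VERDICT (by name: the statement is the Claim_ definition above) =====
theorem normalize_phase_bucket_py_spec : Claim_equal_normalize_phase_bucket_py := by
  intro phase _
  unfold Spec_normalize_phase_bucket_py normalize_phase_bucket_py normalize_phase_bucket_py_alt
  cases phase with
  | none => rfl
  | some p =>
    by_cases hp : p = ""
    · subst hp; rfl
    · simp only []
      rw [if_neg hp, if_neg hp]
      have hkey :
          (PySem.Chars.splitOn
              (PySem.Chars.replace (PySem.Chars.replace (PySem.Chars.replace
                (PySem.Chars.lower (PySem.Chars.strip p.toList)) [' '] ['_'])
                ['-'] ['_']) ['/'] ['_']) ['_']).filter (fun part => part ≠ [])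
            = pvTokens [] (PySem.Chars.lower (PySem.Chars.strip p.toList)) := by
        rw [pv_replace_single, pv_replace_single, pv_replace_single, pv_rep3_eq,
          pv_splitOn_eq, pv_split_map, pv_tokens_filter _ []]
        cases hs : pvSplit pvIsSep (PySem.Chars.lower (PySem.Chars.strip p.toList)) with
        | nil => exact absurd hs (pvSplit_ne_nil _ _)
        | cons t ts => simp [pvConsCur]
      have hfold := pv_foldl_tokens (PySem.Chars.lower (PySem.Chars.strip p.toList)) [] []
      simp only [List.nil_append] at hfold
      rw [hkey, hfold]
      exact pv_bucket_eq _
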